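-- pv_equiv track=rewrite | github.com/AJLex/App_for_generating_suggestion | search_by_dict.py | suggest_options
-- ===== SOURCE A (Python) =====
-- def suggest_options(input_data):
--     suggest_options_dict = {}
--     for prefix in input_data[1]:
--         list_of_options = []
--         if len(prefix) > 1:
--             for letter in input_data[0].keys():
--                 if prefix[0] == letter:
--                     for letters in input_data[0][letter].keys():
--                         if prefix[0:2] == letters:
--                             for word, freq in input_data[0][letter][letters].items():
--                                 if prefix == word[:len(prefix)]:
--                                     list_of_options.append((word, int(freq)))
--         else:
--             for letter in input_data[2].keys():
--                 if prefix == letter: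
--                     for word, freq in input_data[2][letter].items():
--                         list_of_options.append((word, int(freq)))
--         list_of_options.sort(key=lambda word_info: word_info[1], reverse=True)
--         suggest_options_dict[prefix] = list_of_options[:10]
--     return suggest_options_dict
-- ===== SOURCE B (Python) =====
-- def suggest_options(input_data):
--     tree, prefixes, single = input_data
--     result = {}
--     for prefix in prefixes:
--         if len(prefix) > 1:
--             bucket = tree.get(prefix[0], {}).get(prefix[:2], {})
--             candidates = [(w, int(f)) for w, f in bucket.items() if w.startswith(prefix)]
--         else:
--             candidates = [(w, int(f)) for w, f in single.get(prefix, {}).items()]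
--         top = []
--         for item in candidates:
--             i = 0
--             while i < len(top) and top[i][1] >= item[1]:
--                 i += 1
--             top.insert(i, item)
--             if len(top) > 10:
--                 top.pop()
--         result[prefix] = top
--     return result
-- ===== Notes on version B (the rewrite author's own statement) =====
-- stated objective: faster
-- what changed: B replaces A's linear scans over all dict keys at the two outer levels by direct dict.get lookups, and replaces the full sort (descending by frequency) followed by [:10] with a single bounded top-10 insertion pass over the candidates.
import Mathlib
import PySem

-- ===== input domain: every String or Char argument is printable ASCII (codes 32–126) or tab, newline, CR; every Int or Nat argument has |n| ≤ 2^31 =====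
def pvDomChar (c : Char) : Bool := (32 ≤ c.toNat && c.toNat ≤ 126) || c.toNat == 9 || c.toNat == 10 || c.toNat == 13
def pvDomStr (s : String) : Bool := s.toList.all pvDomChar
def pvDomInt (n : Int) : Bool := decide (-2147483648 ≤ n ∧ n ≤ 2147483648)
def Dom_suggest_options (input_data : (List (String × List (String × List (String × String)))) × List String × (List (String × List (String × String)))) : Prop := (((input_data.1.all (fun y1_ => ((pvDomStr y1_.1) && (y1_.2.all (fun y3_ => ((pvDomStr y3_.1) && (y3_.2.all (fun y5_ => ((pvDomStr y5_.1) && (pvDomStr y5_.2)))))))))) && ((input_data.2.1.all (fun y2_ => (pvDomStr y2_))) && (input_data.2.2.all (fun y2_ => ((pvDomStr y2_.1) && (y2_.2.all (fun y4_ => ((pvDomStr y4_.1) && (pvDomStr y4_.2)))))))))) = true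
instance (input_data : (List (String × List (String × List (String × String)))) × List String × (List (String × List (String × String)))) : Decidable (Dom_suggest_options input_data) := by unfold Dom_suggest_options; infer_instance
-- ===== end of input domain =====

-- B replaces A's linear scans over the dict keys by direct dict lookups and A's full
-- sort-then-truncate by a bounded top-10 insertion pass.

-- int(s); Pre_ guarantees (PySem.Int.ofStr? s).isSome at every use, so the default is never read
def pvIntOf (s : String) : Int := (PySem.Int.ofStr? s).getD 0

-- ===== PORT A =====
-- prefix[0] (a one-character string; len(prefix) > 1 holds on that branch) is written prefix[0:1];
-- string equality is decided on .toList (code points), which is Python's string equality.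
def suggest_options (input_data : (List (String × List (String × List (String × String)))) × List String × (List (String × List (String × String)))) : List (String × List (String × Int)) :=
  (input_data.2.1.foldl (fun (res : PySem.Dict String (List (String × Int))) pfx =>
    res.insert pfx (PySem.List.slice (PySem.List.sorted
      (if 1 < PySem.Str.len pfx then
        input_data.1.foldl (fun o1 e =>
          if PySem.List.slice pfx.toList (some 0) (some 1) == e.1.toList then
            e.2.foldl (fun o2 e2 =>
              if PySem.List.slice pfx.toList (some 0) (some 2) == e2.1.toList then
                e2.2.foldl (fun o3 wf =>
                  if pfx.toList == PySem.List.slice wf.1.toList none (some (PySem.Str.len pfx)) then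
                    o3 ++ [(wf.1, pvIntOf wf.2)]
                  else o3) o2
              else o2) o1
          else o1) []
      else
        input_data.2.2.foldl (fun o1 e =>
          if pfx.toList == e.1.toList then
            e.2.foldl (fun o2 wf => o2 ++ [(wf.1, pvIntOf wf.2)]) o1
          else o1) [])
      (fun wi => wi.2) true) none (some 10)))
    PySem.Dict.empty).items

-- ===== PORT B =====
-- dict.get(k, dflt) on the association list (unique keys under Pre_): the first key match;
-- keys are compared on .toList (code points), which is Python's string equality.
def pvGetD {ν : Type} (l : List (String × ν)) (k : List Char) (dflt : ν) : ν :=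
  ((l.find? (fun e => e.1.toList == k)).map Prod.snd).getD dflt

-- Source B's while/insert: skip the entries with freq ≥ item's, insert before the first smaller one
def pvInsertDesc (item : String × Int) : List (String × Int) → List (String × Int)
  | [] => [item]
  | y :: ys => if item.2 ≤ y.2 then y :: pvInsertDesc item ys else item :: y :: ys

def suggest_options_alt (input_data : (List (String × List (String × List (String × String)))) × List String × (List (String × List (String × String)))) : List (String × List (String × Int)) :=
  (input_data.2.1.foldl (fun (res : PySem.Dict String (List (String × Int))) pfx =>
    res.insert pfx
      ((if 1 < PySem.Str.len pfx then
          ((pvGetD (pvGetD input_data.1 (pfx.toList.take 1) []) (pfx.toList.take 2) []).filter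
              (fun wf => PySem.Chars.startswith wf.1.toList pfx.toList)).map
            (fun wf => (wf.1, pvIntOf wf.2))
        else
          (pvGetD input_data.2.2 pfx.toList []).map (fun wf => (wf.1, pvIntOf wf.2))).foldl
        (fun t item =>
          let t' := pvInsertDesc item t
          if 10 < t'.length then t'.dropLast else t') []))
    PySem.Dict.empty).items

-- ===== PRECONDITION & SPEC =====
-- Pre_ excludes (a) association lists with duplicate keys at a dict level, which do not represent
-- a Python dict (Python collapses them before A ever runs), and (b) inputs where a selected
-- frequency string is not an int literal, on which A raises ValueError.
def Pre_suggest_options (input_data : (List (String × List (String × List (String × String)))) × List String × (List (String × List (String × String)))) : Prop :=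
  (input_data.1.map Prod.fst).Nodup ∧
  (∀ e ∈ input_data.1, (e.2.map Prod.fst).Nodup) ∧
  (input_data.2.2.map Prod.fst).Nodup ∧
  ∀ pfx ∈ input_data.2.1,
    (1 < pfx.toList.length →
      ∀ e ∈ input_data.1, e.1.toList = pfx.toList.take 1 →
      ∀ e2 ∈ e.2, e2.1.toList = pfx.toList.take 2 →
      ∀ wf ∈ e2.2, pfx.toList = wf.1.toList.take pfx.toList.length →
        (PySem.Int.ofStr? wf.2).isSome = true) ∧
    (¬ 1 < pfx.toList.length →
      ∀ e ∈ input_data.2.2, e.1.toList = pfx.toList →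
      ∀ wf ∈ e.2, (PySem.Int.ofStr? wf.2).isSome = true)
instance (input_data : (List (String × List (String × List (String × String)))) × List String × (List (String × List (String × String)))) : Decidable (Pre_suggest_options input_data) := by unfold Pre_suggest_options; infer_instance

def pvWitness_suggest_options : ((List (String × List (String × List (String × String)))) × List String × (List (String × List (String × String)))) :=
  ([("a", [("ab", [("abc", "12"), ("abd", "3")])])], ["ab", "a", ""], [("a", [("apple", "7")])])

def Spec_suggest_options (input_data : (List (String × List (String × List (String × String)))) × List String × (List (String × List (String × String)))) (out : List (String × List (String × Int))) : Prop := out = suggest_options_alt input_data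
instance (input_data : (List (String × List (String × List (String × String)))) × List String × (List (String × List (String × String)))) (out : List (String × List (String × Int))) : Decidable (Spec_suggest_options input_data out) := by unfold Spec_suggest_options; infer_instance

-- ===== CLAIM (what is proved, stated in full; the proofs are below) =====
def Claim_equal_suggest_options : Prop := ∀ (input_data : (List (String × List (String × List (String × String)))) × List String × (List (String × List (String × String)))), Dom_suggest_options input_data → Pre_suggest_options input_data → Spec_suggest_options input_data (suggest_options input_data)

-- ===== LEMMAS AND PROOFS =====

theorem pvWitness_ok : Dom_suggest_options pvWitness_suggest_options ∧ Pre_suggest_options pvWitness_suggest_options := by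
  constructor <;> decide

-- a key-filtered fold over an assoc list does nothing when no key matches
theorem pv_foldl_key_none {ν β : Type} (l : List (String × ν)) (c : List Char)
    (g : β → (String × ν) → β) (init : β) (h : ∀ e ∈ l, e.1.toList ≠ c) :
    l.foldl (fun acc e => if c == e.1.toList then g acc e else acc) init = init := by
  induction l generalizing init with
  | nil => rfl
  | cons hd tl ih =>
    have hhd : hd.1.toList ≠ c := h hd (by simp)
    simp only [List.foldl_cons]
    rw [if_neg (by simp [Ne.symm hhd])]
    exact ih init (fun e he => h e (by simp [he]))

-- a key-filtered fold over an assoc list with distinct keys processes exactly the found entry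
theorem pv_foldl_key_eq {ν β : Type} (l : List (String × ν)) (c : List Char)
    (g : β → (String × ν) → β) (init : β) (hnd : (l.map Prod.fst).Nodup) :
    l.foldl (fun acc e => if c == e.1.toList then g acc e else acc) init
      = (l.find? (fun e => e.1.toList == c)).elim init (g init) := by
  induction l generalizing init with
  | nil => rfl
  | cons hd tl ih =>
    simp only [List.map_cons, List.nodup_cons] at hnd
    simp only [List.foldl_cons]
    by_cases h : hd.1.toList = c
    · rw [if_pos (by simp [h]), List.find?_cons_of_pos (by simp [h]), Option.elim_some]
      refine pv_foldl_key_none tl c g _ ?_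
      intro e he hc
      have he1 : e.1 = hd.1 := String.toList_inj.mp (hc.trans h.symm)
      have hm : e.1 ∈ List.map Prod.fst tl := List.mem_map_of_mem he
      rw [he1] at hm
      exact hnd.1 hm
    · rw [if_neg (by simp [Ne.symm h]), List.find?_cons_of_neg (by simp [h])]
      exact ih init hnd.2

-- the candidate lists agree (len(prefix) > 1 arm)
theorem pv_cand_long (d0 : List (String × List (String × List (String × String)))) (pfx : String)
    (hnd0 : (d0.map Prod.fst).Nodup) (hnd1 : ∀ e ∈ d0, (e.2.map Prod.fst).Nodup) :
    d0.foldl (fun o1 e =>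
      if PySem.List.slice pfx.toList (some 0) (some 1) == e.1.toList then
        e.2.foldl (fun o2 e2 =>
          if PySem.List.slice pfx.toList (some 0) (some 2) == e2.1.toList then
            e2.2.foldl (fun o3 wf =>
              if pfx.toList == PySem.List.slice wf.1.toList none (some (PySem.Str.len pfx)) then
                o3 ++ [(wf.1, pvIntOf wf.2)]
              else o3) o2
          else o2) o1
      else o1) []
    = ((pvGetD (pvGetD d0 (pfx.toList.take 1) []) (pfx.toList.take 2) []).filter
        (fun wf => PySem.Chars.startswith wf.1.toList pfx.toList)).map (fun wf => (wf.1, pvIntOf wf.2)) := by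
  have hs1 : PySem.List.slice pfx.toList (some 0) (some 1) = pfx.toList.take 1 := by simp [pysem]
  have hs2 : PySem.List.slice pfx.toList (some 0) (some 2) = pfx.toList.take 2 := by simp [pysem]
  rw [hs1, hs2, pv_foldl_key_eq d0 (pfx.toList.take 1) _ [] hnd0]
  unfold pvGetD
  cases hf : d0.find? (fun e => e.1.toList == pfx.toList.take 1) with
  | none => simp
  | some e =>
    have he : e ∈ d0 := List.mem_of_find?_eq_some hf
    simp only [Option.elim_some, Option.map_some, Option.getD_some]
    rw [pv_foldl_key_eq e.2 (pfx.toList.take 2) _ [] (hnd1 e he)]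
    cases hf2 : e.2.find? (fun e2 => e2.1.toList == pfx.toList.take 2) with
    | none => simp
    | some e2 =>
      simp only [Option.elim_some, Option.map_some, Option.getD_some]
      rw [PySem.List.foldl_append_if
        (fun wf => pfx.toList == PySem.List.slice wf.1.toList none (some (PySem.Str.len pfx)))
        (fun wf => (wf.1, pvIntOf wf.2)) e2.2 []]
      simp only [List.nil_append]
      congr 1
      apply List.filter_congr
      intro wf _
      have hsl : PySem.List.slice wf.1.toList none (some (PySem.Str.len pfx))
          = wf.1.toList.take pfx.toList.length := by
        rw [PySem.Str.len_eq, PySem.List.slice_to_natCast]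
      rw [hsl]
      by_cases hp : pfx.toList = wf.1.toList.take pfx.toList.length
      · have h1 : (pfx.toList == wf.1.toList.take pfx.toList.length) = true := beq_iff_eq.mpr hp
        have h2 : PySem.Chars.startswith wf.1.toList pfx.toList = true :=
          (PySem.Chars.startswith_iff _ _).mpr (List.prefix_iff_eq_take.mpr hp)
        rw [h1, h2]
      · have h1 : (pfx.toList == wf.1.toList.take pfx.toList.length) = false := beq_eq_false_iff_ne.mpr hp
        have h2 : PySem.Chars.startswith wf.1.toList pfx.toList = false := by
          rw [Bool.eq_false_iff]
          intro hc
          exact hp (List.prefix_iff_eq_take.mp ((PySem.Chars.startswith_iff _ _).mp hc))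
        rw [h1, h2]

-- the candidate lists agree (len(prefix) ≤ 1 arm)
theorem pv_cand_short (d2 : List (String × List (String × String))) (pfx : String)
    (hnd : (d2.map Prod.fst).Nodup) :
    d2.foldl (fun o1 e =>
      if pfx.toList == e.1.toList then
        e.2.foldl (fun o2 wf => o2 ++ [(wf.1, pvIntOf wf.2)]) o1
      else o1) []
    = (pvGetD d2 pfx.toList []).map (fun wf => (wf.1, pvIntOf wf.2)) := by
  rw [pv_foldl_key_eq d2 pfx.toList _ [] hnd]
  unfold pvGetD
  cases hf : d2.find? (fun e => e.1.toList == pfx.toList) with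
  | none => simp
  | some e =>
    simp only [Option.elim_some, Option.map_some, Option.getD_some]
    rw [PySem.List.foldl_append_singleton_eq_map]
    simp

-- Source B's insertion step is PySem's insertBy with the descending-by-frequency predicate
theorem pvInsertDesc_eq_insertBy (item : String × Int) (l : List (String × Int)) :
    pvInsertDesc item l = PySem.List.insertBy (fun a b => decide (b.2 < a.2)) item l := by
  induction l with
  | nil => rfl
  | cons y ys ih =>
    unfold pvInsertDesc PySem.List.insertBy
    by_cases h : item.2 ≤ y.2
    · rw [if_pos h, if_neg (by simp; omega), ih]
    · rw [if_neg h, if_pos (by simp; omega)]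

theorem pv_length_insertBy {α : Type} (b : α → α → Bool) (x : α) (l : List α) :
    (PySem.List.insertBy b x l).length = l.length + 1 := by
  induction l with
  | nil => rfl
  | cons y ys ih =>
    unfold PySem.List.insertBy
    by_cases h : b x y
    · simp [h]
    · simp [h, ih]

-- the first k of an insertion depend only on the first k of the list
theorem pv_take_insertBy {α : Type} (b : α → α → Bool) (x : α) (k : Nat) (l : List α) :
    (PySem.List.insertBy b x l).take k = (PySem.List.insertBy b x (l.take k)).take k := by
  induction l generalizing k with
  | nil => simp
  | cons y ys ih =>
    cases k with
    | zero => simp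
    | succ k =>
      simp only [List.take_succ_cons]
      unfold PySem.List.insertBy
      by_cases h : b x y = true
      · rw [if_pos h, if_pos h]
        simp only [List.take_succ_cons]
        cases k with
        | zero => simp
        | succ j =>
          simp [List.take_take]
      · rw [if_neg h, if_neg h]
        simp only [List.take_succ_cons]
        rw [ih k]

theorem pv_take_foldl_insertBy {α : Type} (b : α → α → Bool) (k : Nat) (l : List α) (init : List α) :
    (l.foldl (fun acc x => PySem.List.insertBy b x acc) init).take k
      = l.foldl (fun acc x => (PySem.List.insertBy b x acc).take k) (init.take k) := by
  induction l generalizing init with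
  | nil => rfl
  | cons x xs ih =>
    simp only [List.foldl_cons]
    rw [ih, ← pv_take_insertBy]

-- B's bounded pass, started below the bound, is the take-10-each-step insertion fold
theorem pv_bounded_foldl (l : List (String × Int)) (t : List (String × Int)) (h : t.length ≤ 10) :
    l.foldl (fun t item =>
        let t' := pvInsertDesc item t
        if 10 < t'.length then t'.dropLast else t') t
      = l.foldl (fun acc x => (PySem.List.insertBy (fun a b => decide (b.2 < a.2)) x acc).take 10) t := by
  induction l generalizing t with
  | nil => rfl
  | cons x xs ih =>
    simp only [List.foldl_cons]
    have hstep : (let t' := pvInsertDesc x t; if 10 < t'.length then t'.dropLast else t')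
        = (PySem.List.insertBy (fun a b => decide (b.2 < a.2)) x t).take 10 := by
      simp only [pvInsertDesc_eq_insertBy]
      set t' := PySem.List.insertBy (fun a b => decide (b.2 < a.2)) x t with ht'
      have hlen : t'.length = t.length + 1 := pv_length_insertBy _ _ _
      by_cases hc : 10 < t'.length
      · rw [if_pos hc]
        have h10 : t'.length - 1 = 10 := by omega
        rw [List.dropLast_eq_take, h10]
      · rw [if_neg hc]
        exact (List.take_of_length_le (by omega)).symm
    rw [hstep]
    exact ih _ (by simp [List.length_take])

-- the per-prefix top-10: A's sort-descending-then-first-10 is B's bounded pass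
theorem pv_top_eq (cands : List (String × Int)) :
    PySem.List.slice (PySem.List.sorted cands (fun wi => wi.2) true) none (some 10)
      = cands.foldl (fun t item =>
          let t' := pvInsertDesc item t
          if 10 < t'.length then t'.dropLast else t') [] := by
  have hsl : PySem.List.slice (PySem.List.sorted cands (fun wi => wi.2) true) none (some 10)
      = (PySem.List.sorted cands (fun wi => wi.2) true).take 10 := by simp [pysem]
  rw [hsl, PySem.List.sorted_rev_eq_foldl_insertBy, pv_take_foldl_insertBy,
    pv_bounded_foldl cands [] (by simp)]
  rfl

-- ===== VERDICT (by name: the statement is the Claim_ definition above) =====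
theorem suggest_options_spec : Claim_equal_suggest_options := by
  intro input_data _ hpre
  obtain ⟨hnd0, hnd1, hnd2, _⟩ := hpre
  unfold Spec_suggest_options suggest_options suggest_options_alt
  congr 1
  apply PySem.List.foldl_congr_mem
  intro acc pfx _
  congr 1
  by_cases hl : 1 < PySem.Str.len pfx
  · rw [if_pos hl, if_pos hl, pv_cand_long input_data.1 pfx hnd0 hnd1, pv_top_eq]
  · rw [if_neg hl, if_neg hl, pv_cand_short input_data.2.2 pfx hnd2, pv_top_eq]
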